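-- pv_equiv track=rewrite | github.com/MViscardi-UCSC/ANDROMEDA | andromeda/ref_pos_picker.py | group_ambiguous_bases
-- ===== SOURCE A (Python) =====
-- from typing import List, Tuple
--
-- def group_ambiguous_bases(ambiguous_positions: List[int], padding: int = 5) -> List[Tuple[int, int]]:
--     """
--     Groups ambiguous base positions into contiguous regions, allowing for a padding of X bases around each cluster.
--
--     Thanks, ChatGPT!!
--
--     :param ambiguous_positions: List of positions (integers) where ambiguous bases are found.
--     :param padding: Number of additional bases to include around each grouping.
--     :return: List of tuples (start, end) representing grouped ambiguous base regions.
--     """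
--     if not ambiguous_positions:
--         return []
--
--     # Sort positions to process in order
--     ambiguous_positions.sort()
--
--     grouped_regions = []
--     start = ambiguous_positions[0]
--     prev_position = start
--
--     for i in range(1, len(ambiguous_positions)):
--         current = ambiguous_positions[i]
--
--         # If the current position is more than (padding * 2) bases away, start a new group
--         if current > prev_position + (padding * 2):
--             # Append the previous group with padding
--             grouped_regions.append((max(0, start - padding), prev_position + padding))
--             start = current  # Start new group
--
--         prev_position = current  # Update previous position
--
--     # Append the last detected group
--     grouped_regions.append((max(0, start - padding), prev_position + padding))
--
--     return grouped_regions
-- ===== SOURCE B (Python) =====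
-- from typing import List, Tuple
--
-- def group_ambiguous_bases(ambiguous_positions: List[int], padding: int = 5) -> List[Tuple[int, int]]:
--     """Break-point formulation: find the gap pairs between adjacent sorted positions,
--     then pair up region starts with region ends directly (no sequential group state).
--     Sorts ambiguous_positions in place, like the original."""
--     if not ambiguous_positions:
--         return []
--     ambiguous_positions.sort()
--     xs = ambiguous_positions
--     gaps = [(a, b) for a, b in zip(xs, xs[1:]) if b > a + 2 * padding]
--     starts = [xs[0]] + [b for _, b in gaps]
--     ends = [a for a, _ in gaps] + [xs[-1]]
--     return [(max(0, s - padding), e + padding) for s, e in zip(starts, ends)]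
-- ===== Notes on version B (the rewrite author's own statement) =====
-- stated objective: alternative
-- what changed: B replaces A's fused stateful loop (carrying start/prev and emitting a region at each break) by a break-point formulation: it extracts the adjacent pairs whose gap exceeds 2*padding via zip(xs, xs[1:]), derives the region starts and region ends as two parallel lists from those boundary pairs, and zips them into the padded regions.
import Mathlib
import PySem

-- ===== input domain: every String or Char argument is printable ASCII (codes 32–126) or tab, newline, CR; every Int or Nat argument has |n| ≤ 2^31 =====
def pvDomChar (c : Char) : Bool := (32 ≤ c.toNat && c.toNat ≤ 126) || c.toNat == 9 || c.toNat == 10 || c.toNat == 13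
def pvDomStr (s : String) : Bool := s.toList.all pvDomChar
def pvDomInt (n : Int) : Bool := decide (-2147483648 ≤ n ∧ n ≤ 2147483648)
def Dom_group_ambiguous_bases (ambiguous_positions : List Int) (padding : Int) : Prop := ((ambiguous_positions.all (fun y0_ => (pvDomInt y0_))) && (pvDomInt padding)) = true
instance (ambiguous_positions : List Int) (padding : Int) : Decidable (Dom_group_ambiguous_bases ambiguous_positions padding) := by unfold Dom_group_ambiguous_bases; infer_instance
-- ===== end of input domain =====

-- B computes regions by a break-point/zip formulation instead of A's fused stateful loop (alternative
-- decomposition, same cost). Both Pythons sort the list in place; equivalence is about the return value.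

-- ===== PORT A =====
-- fused loop of A: state = (grouped_regions, start, prev_position)
def loopA (rest : List Int) (acc : List (Int × Int)) (start prev padding : Int) : List (Int × Int) :=
  match rest with
  | [] => acc ++ [(max 0 (start - padding), prev + padding)]
  | current :: rs =>
      if current > prev + padding * 2 then
        loopA rs (acc ++ [(max 0 (start - padding), prev + padding)]) current current padding
      else
        loopA rs acc start current padding

def group_ambiguous_bases (ambiguous_positions : List Int) (padding : Int) : List (Int × Int) :=
  if ambiguous_positions = [] then []
  else
    match PySem.List.sorted ambiguous_positions (fun x => x) false with
    | [] => []
    | h :: t => loopA t [] h h padding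

-- ===== PORT B =====
def group_ambiguous_bases_alt (ambiguous_positions : List Int) (padding : Int) : List (Int × Int) :=
  if ambiguous_positions = [] then []
  else
    match PySem.List.sorted ambiguous_positions (fun x => x) false with
    | [] => []
    | h :: t =>
        -- zip(xs, xs[1:]): for the nonempty sorted list h :: t, xs[1:] is t
        let gaps := ((h :: t).zip t).filter (fun ab => ab.2 > ab.1 + 2 * padding)
        -- starts = [xs[0]] + [b for _, b in gaps]
        let starts := h :: gaps.map Prod.snd
        -- ends = [a for a, _ in gaps] + [xs[-1]]  (xs[-1] of the nonempty list: getLastD is exact)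
        let ends := gaps.map Prod.fst ++ [(h :: t).getLastD 0]
        (starts.zip ends).map (fun se => (max 0 (se.1 - padding), se.2 + padding))

-- ===== PRECONDITION & SPEC =====
def Spec_group_ambiguous_bases (ambiguous_positions : List Int) (padding : Int) (out : List (Int × Int)) : Prop := out = group_ambiguous_bases_alt ambiguous_positions padding
instance (ambiguous_positions : List Int) (padding : Int) (out : List (Int × Int)) : Decidable (Spec_group_ambiguous_bases ambiguous_positions padding out) := by unfold Spec_group_ambiguous_bases; infer_instance

-- ===== CLAIM (what is proved, stated in full; the proofs are below) =====
def Claim_equal_group_ambiguous_bases : Prop := ∀ (ambiguous_positions : List Int) (padding : Int), Dom_group_ambiguous_bases ambiguous_positions padding → Spec_group_ambiguous_bases ambiguous_positions padding (group_ambiguous_bases ambiguous_positions padding)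

-- ===== LEMMAS AND PROOFS =====

-- common recursive characterization of one region pass, used to relate both ports
def specR (start : Int) (rest : List Int) (prev p : Int) : List (Int × Int) :=
  match rest with
  | [] => [(max 0 (start - p), prev + p)]
  | c :: rs =>
      if c > prev + p * 2 then
        (max 0 (start - p), prev + p) :: specR c rs c p
      else
        specR start rs c p

theorem loopA_eq_specR (rest : List Int) (acc : List (Int × Int)) (start prev p : Int) :
    loopA rest acc start prev p = acc ++ specR start rest prev p := by
  induction rest generalizing acc start prev with
  | nil => simp [loopA, specR]
  | cons c rs ih =>
      by_cases h : c > prev + p * 2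
      · simp [loopA, specR, h, ih]
      · simp [loopA, specR, h, ih]

theorem zipC_eq_specR (rest : List Int) (st prev p : Int) :
    ((st :: (((prev :: rest).zip rest).filter (fun ab => ab.2 > ab.1 + 2 * p)).map Prod.snd).zip
      ((((prev :: rest).zip rest).filter (fun ab => ab.2 > ab.1 + 2 * p)).map Prod.fst
        ++ [(prev :: rest).getLastD 0])).map
      (fun se => (max 0 (se.1 - p), se.2 + p))
    = specR st rest prev p := by
  induction rest generalizing st prev with
  | nil => simp [specR]
  | cons c rs ih =>
      by_cases h : c > prev + p * 2
      · have h' : c > prev + 2 * p := by omega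
        simp only [specR, if_pos h]
        have := ih c c
        simp only [List.zip_cons_cons, List.filter_cons, h', decide_true, if_pos,
          List.map_cons, List.cons_append, List.getLastD_cons] at *
        rw [← this]
      · have h' : ¬ c > prev + 2 * p := by omega
        simp only [specR, if_neg h]
        have := ih st c
        simp only [List.zip_cons_cons, List.filter_cons, h', decide_false,
          List.getLastD_cons] at *
        rw [← this]
        rcases rs with _ | ⟨d, rs'⟩ <;> simp

-- ===== VERDICT (by name: the statement is the Claim_ definition above) =====
theorem group_ambiguous_bases_spec : Claim_equal_group_ambiguous_bases := by
  intro xs padding _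
  unfold Spec_group_ambiguous_bases group_ambiguous_bases group_ambiguous_bases_alt
  by_cases hxs : xs = []
  · simp [hxs]
  · simp only [hxs, if_neg, not_false_iff]
    cases hs : PySem.List.sorted xs (fun x => x) false with
    | nil => rfl
    | cons h t =>
        dsimp only
        rw [loopA_eq_specR, ← zipC_eq_specR t h h padding]
        simp
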